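-- pv_equiv track=rewrite | github.com/tejashah88/caliXfer | backend/tools/assist_api.py | simplify_school_names
-- ===== SOURCE A (Python) =====
-- def simplify_school_names(name):
--     name_map = [
--         ('California Polytechnic University,',  'Cal Poly'  ),
--         ('California State University,',        'CSU'       ),
--         ('University of California,',           'UC'        ),
--     ]
--
--     for (old_name, new_name) in name_map:
--         name = name.replace(old_name, new_name)
--
--     return name
-- ===== SOURCE B (Python) =====
-- def simplify_school_names(name):
--     name_map = [
--         ('California Polytechnic University,', 'Cal Poly'),
--         ('California State University,', 'CSU'),
--         ('University of California,', 'UC'),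
--     ]
--     parts = []
--     i = 0
--     n = len(name)
--     while i < n:
--         for old_name, new_name in name_map:
--             if name.startswith(old_name, i):
--                 parts.append(new_name)
--                 i += len(old_name)
--                 break
--         else:
--             parts.append(name[i])
--             i += 1
--     return ''.join(parts)
-- ===== Notes on version B (the rewrite author's own statement) =====
-- stated objective: alternative
-- what changed: Replaces three sequential whole-string str.replace passes by a single left-to-right table-driven scan that tries the three patterns in order at each position and skips past a match.
-- intended difference: On strings containing the substring 'California State University,niversity of California,' A's second pass rewrites the first pattern to 'CSU' whose trailing 'U' then cascades with the following text into a spurious 'University of California,' match (A returns e.g. 'CSUC'), while B's single pass abbreviates only the text actually present ('CSUniversity of California,'), which is the intended behaviour of a name abbreviator. — e.g. on simplify_school_names("California State University,niversity of California,"): A returns "CSUC", B returns "CSUniversity of California,"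
import Mathlib
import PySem

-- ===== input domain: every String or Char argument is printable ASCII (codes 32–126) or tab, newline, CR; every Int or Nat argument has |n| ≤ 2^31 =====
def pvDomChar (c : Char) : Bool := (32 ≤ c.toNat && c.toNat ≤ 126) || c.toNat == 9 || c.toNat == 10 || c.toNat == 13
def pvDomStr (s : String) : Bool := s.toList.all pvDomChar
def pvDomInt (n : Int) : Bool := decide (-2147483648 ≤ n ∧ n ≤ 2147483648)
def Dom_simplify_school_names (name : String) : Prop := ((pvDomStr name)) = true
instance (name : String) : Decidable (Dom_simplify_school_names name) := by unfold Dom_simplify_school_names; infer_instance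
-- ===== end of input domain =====

-- B replaces A's three sequential whole-string replace passes by a single left-to-right
-- table-driven scan (objective: alternative); on the cascade inputs described at D_ below, B's
-- single pass returns the intended value where A's second pass creates a spurious match.

-- ===== PORT A =====
def simplify_school_names (name : String) : String :=
  let name_map : List (String × String) :=
    [ ("California Polytechnic University,", "Cal Poly"),
      ("California State University,",       "CSU"),
      ("University of California,",          "UC") ]
  name_map.foldl (fun name p => PySem.Str.replace name p.1 p.2) name

-- ===== PORT B =====
def pvP1 : List Char := "California Polytechnic University,".toList
def pvR1 : List Char := "Cal Poly".toList
def pvP2 : List Char := "California State University,".toList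
def pvR2 : List Char := "CSU".toList
def pvP3 : List Char := "University of California,".toList
def pvR3 : List Char := "UC".toList

-- the while-loop of Source B: at each position try the three patterns in table order
-- (the inner for/break unrolled), emit the replacement and skip, else copy one char
def altgo : List Char → List Char
  | [] => []
  | c :: t =>
    if pvP1.isPrefixOf (c :: t) then pvR1 ++ altgo (t.drop 33)
    else if pvP2.isPrefixOf (c :: t) then pvR2 ++ altgo (t.drop 27)
    else if pvP3.isPrefixOf (c :: t) then pvR3 ++ altgo (t.drop 24)
    else c :: altgo t
termination_by l => l.length
decreasing_by all_goals (simp; try omega)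

def simplify_school_names_alt (name : String) : String :=
  String.ofList (altgo name.toList)

-- ===== PRECONDITION & SPEC =====
-- On strings containing "California State University,niversity of California," A's second pass
-- rewrites the first pattern to "CSU" whose trailing 'U' cascades with the following text into a
-- spurious "University of California," match (A returns e.g. "CSUC"), while B's single pass
-- abbreviates only the text actually present ("CSUniversity of California,"), which is the
-- intended behaviour of a name abbreviator.
def D_simplify_school_names (name : String) : Prop :=
  PySem.Str.isIn "California State University,niversity of California," name = true
instance (name : String) : Decidable (D_simplify_school_names name) := by
  unfold D_simplify_school_names; infer_instance

def Spec_simplify_school_names (name : String) (out : String) : Prop :=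
  ¬ D_simplify_school_names name → out = simplify_school_names_alt name
instance (name : String) (out : String) : Decidable (Spec_simplify_school_names name out) := by
  unfold Spec_simplify_school_names; infer_instance

def pvDiffWitness_simplify_school_names : String :=
  "California State University,niversity of California,"
def pvDiffWitnessOut_simplify_school_names : String × String :=
  ("CSUC", "CSUniversity of California,")

-- ===== CLAIM (what is proved, stated in full; the proofs are below) =====
def Claim_unchanged_simplify_school_names : Prop :=
  ∀ (name : String), Dom_simplify_school_names name →
    Spec_simplify_school_names name (simplify_school_names name)
def Claim_changed_simplify_school_names : Prop :=
  Dom_simplify_school_names (pvDiffWitness_simplify_school_names) ∧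
  D_simplify_school_names (pvDiffWitness_simplify_school_names) ∧
  simplify_school_names (pvDiffWitness_simplify_school_names) = pvDiffWitnessOut_simplify_school_names.1 ∧
  simplify_school_names_alt (pvDiffWitness_simplify_school_names) = pvDiffWitnessOut_simplify_school_names.2 ∧
  pvDiffWitnessOut_simplify_school_names.1 ≠ pvDiffWitnessOut_simplify_school_names.2
def Claim_exact_simplify_school_names : Prop :=
  ∀ (name : String), Dom_simplify_school_names name → D_simplify_school_names name →
    simplify_school_names name ≠ simplify_school_names_alt name

-- ===== LEMMAS AND PROOFS =====

def pvMagic : List Char := "California State University,niversity of California,".toList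

-- one pass of Python's str.replace (old nonempty): scan left to right, replace non-overlapping matches
def rep : List Char → List Char → List Char → List Char
  | _, _, [] => []
  | [], new, c :: t => c :: rep [] new t
  | o :: os, new, c :: t =>
    if (o :: os).isPrefixOf (c :: t) then new ++ rep (o :: os) new (t.drop os.length)
    else c :: rep (o :: os) new t
termination_by _ _ l => l.length
decreasing_by all_goals (simp; try omega)

theorem rep_nil (p new : List Char) : rep p new [] = [] := by
  cases p <;> simp [rep]

theorem rep_prefix (p new l : List Char) (hp : p ≠ []) (h : p <+: l) :
    rep p new l = new ++ rep p new (l.drop p.length) := by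
  cases p with
  | nil => exact absurd rfl hp
  | cons o os =>
    cases l with
    | nil => exact absurd (List.eq_nil_of_prefix_nil h) (by simp)
    | cons c t =>
      rw [rep, if_pos (List.isPrefixOf_iff_prefix.mpr h)]
      simp

theorem rep_nprefix (p new : List Char) (c : Char) (t : List Char) (h : ¬ p <+: (c :: t)) :
    rep p new (c :: t) = c :: rep p new t := by
  cases p with
  | nil => exact absurd (List.nil_prefix) h
  | cons o os =>
    rw [rep, if_neg (fun hb => h (List.isPrefixOf_iff_prefix.mp hb))]

theorem go_eq (old new : List Char) (h : old ≠ []) :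
    ∀ fuel l acc, l.length ≤ fuel →
      PySem.Chars.replace.go old new fuel l acc = acc.reverse ++ rep old new l := by
  intro fuel
  induction fuel with
  | zero =>
      intro l acc hl
      have : l = [] := by cases l <;> simp_all
      subst this
      rw [PySem.Chars.replace.go, rep_nil]
  | succ fuel ih =>
      intro l acc hl
      cases l with
      | nil =>
          rw [PySem.Chars.replace.go, rep_nil]
          · simp
          · omega
      | cons c t =>
          rw [PySem.Chars.replace.go]
          by_cases hp : old.isPrefixOf (c :: t)
          · rw [if_pos hp]
            have hpre : old <+: (c :: t) := List.isPrefixOf_iff_prefix.mp hp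
            have hlen : (List.drop old.length (c :: t)).length ≤ fuel := by
              have : 0 < old.length := List.length_pos_iff.mpr h
              simp at hl ⊢
              omega
            rw [ih _ _ hlen, rep_prefix old new (c :: t) h hpre]
            simp
          · rw [if_neg hp]
            have hlen : t.length ≤ fuel := by simp at hl; omega
            rw [ih _ _ hlen, rep_nprefix old new c t (fun hq => hp (List.isPrefixOf_iff_prefix.mpr hq))]
            simp

theorem replace_eq_rep (s old new : List Char) (h : old ≠ []) :
    PySem.Chars.replace s old new = rep old new s := by
  rw [PySem.Chars.replace, if_neg (by simp [h]), go_eq old new h s.length s [] le_rfl]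
  simp

-- no nonempty suffix of q is prefix-compatible with r: occurrences of r (or of a pattern
-- producing r) can neither cross into nor be created by the region q
def Incompat (q r : List Char) : Prop :=
  ∀ u ∈ q.tails, u ≠ [] → ¬ u <+: r ∧ ¬ r <+: u

theorem passThrough (p new a : List Char) (h : Incompat a p) :
    ∀ x, rep p new (a ++ x) = a ++ rep p new x := by
  induction a with
  | nil => intro x; simp
  | cons c a' ih =>
      intro x
      have hself := h (c :: a') ((List.mem_tails _ _).mpr List.suffix_rfl) (by simp)
      have hnp : ¬ p <+: ((c :: a') ++ x) := by
        intro hp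
        rcases List.prefix_or_prefix_of_prefix hp (List.prefix_append (c :: a') x) with h1 | h2
        · exact hself.2 h1
        · exact hself.1 h2
      have ih' : ∀ y, rep p new (a' ++ y) = a' ++ rep p new y := by
        apply ih
        intro u hu hne
        exact h u ((List.mem_tails _ _).mpr (((List.mem_tails _ _).mp hu).trans (List.suffix_cons c a'))) hne
      rw [List.cons_append, rep_nprefix p new c (a' ++ x) (by simpa using hnp), ih' x]
      simp

theorem noCreate (p new q0 : List Char) (h : Incompat q0 new) :
    ∀ l q, q <:+ q0 → q <+: rep p new l → q <+: l := by
  intro l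
  induction l with
  | nil => intro q _ hq; rw [rep_nil] at hq; simpa using hq
  | cons c t ih =>
      intro q hsub hq
      cases q with
      | nil => exact List.nil_prefix
      | cons e q' =>
          by_cases hp : p ≠ [] ∧ p <+: (c :: t)
          · rw [rep_prefix p new (c :: t) hp.1 hp.2] at hq
            have hC := h (e :: q') ((List.mem_tails _ _).mpr hsub) (by simp)
            rcases List.prefix_or_prefix_of_prefix hq (List.prefix_append new _) with h1 | h2
            · exact absurd h1 hC.1
            · exact absurd h2 hC.2
          · have hq' : rep p new (c :: t) = c :: rep p new t := by
              by_cases hpe : p = []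
              · subst hpe; rw [rep]
              · exact rep_nprefix p new c t (fun hx => hp ⟨hpe, hx⟩)
            rw [hq'] at hq
            obtain ⟨he, hq2⟩ := List.cons_prefix_cons.mp hq
            subst he
            exact List.cons_prefix_cons.mpr ⟨rfl, ih q' (List.IsSuffix.trans ⟨[e], rfl⟩ hsub) hq2⟩

theorem altgo_nil : altgo [] = [] := by rw [altgo]

theorem altgo_p1 (l : List Char) (h : pvP1 <+: l) :
    altgo l = pvR1 ++ altgo (l.drop 34) := by
  cases l with
  | nil => exact absurd (List.eq_nil_of_prefix_nil h) (by decide)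
  | cons c t => rw [altgo, if_pos (List.isPrefixOf_iff_prefix.mpr h)]; rfl

theorem altgo_p2 (l : List Char) (h1 : ¬ pvP1 <+: l) (h2 : pvP2 <+: l) :
    altgo l = pvR2 ++ altgo (l.drop 28) := by
  cases l with
  | nil => exact absurd (List.eq_nil_of_prefix_nil h2) (by decide)
  | cons c t =>
      rw [altgo, if_neg (fun hb => h1 (List.isPrefixOf_iff_prefix.mp hb)),
        if_pos (List.isPrefixOf_iff_prefix.mpr h2)]
      rfl

theorem altgo_p3 (l : List Char) (h1 : ¬ pvP1 <+: l) (h2 : ¬ pvP2 <+: l) (h3 : pvP3 <+: l) :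
    altgo l = pvR3 ++ altgo (l.drop 25) := by
  cases l with
  | nil => exact absurd (List.eq_nil_of_prefix_nil h3) (by decide)
  | cons c t =>
      rw [altgo, if_neg (fun hb => h1 (List.isPrefixOf_iff_prefix.mp hb)),
        if_neg (fun hb => h2 (List.isPrefixOf_iff_prefix.mp hb)),
        if_pos (List.isPrefixOf_iff_prefix.mpr h3)]
      rfl

theorem altgo_char (c : Char) (t : List Char) (h1 : ¬ pvP1 <+: (c :: t))
    (h2 : ¬ pvP2 <+: (c :: t)) (h3 : ¬ pvP3 <+: (c :: t)) :
    altgo (c :: t) = c :: altgo t := by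
  rw [altgo, if_neg (fun hb => h1 (List.isPrefixOf_iff_prefix.mp hb)),
    if_neg (fun hb => h2 (List.isPrefixOf_iff_prefix.mp hb)),
    if_neg (fun hb => h3 (List.isPrefixOf_iff_prefix.mp hb))]

def pvQ2 : List Char := "alifornia State University,".toList
def pvQ3 : List Char := "niversity of California,".toList

theorem rep3_CSU (Z : List Char) (h : ¬ pvQ3 <+: Z) :
    rep pvP3 pvR3 (pvR2 ++ Z) = pvR2 ++ rep pvP3 pvR3 Z := by
  have e : pvR2 ++ Z = 'C' :: 'S' :: 'U' :: Z := rfl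
  have n1 : ¬ pvP3 <+: ('C' :: 'S' :: 'U' :: Z) := by
    intro hx
    rw [show pvP3 = 'U' :: pvQ3 from rfl] at hx
    exact absurd (List.cons_prefix_cons.mp hx).1 (by decide)
  have n2 : ¬ pvP3 <+: ('S' :: 'U' :: Z) := by
    intro hx
    rw [show pvP3 = 'U' :: pvQ3 from rfl] at hx
    exact absurd (List.cons_prefix_cons.mp hx).1 (by decide)
  have n3 : ¬ pvP3 <+: ('U' :: Z) := by
    intro hx
    rw [show pvP3 = 'U' :: pvQ3 from rfl] at hx
    exact h (List.cons_prefix_cons.mp hx).2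
  rw [e, rep_nprefix _ _ _ _ n1, rep_nprefix _ _ _ _ n2, rep_nprefix _ _ _ _ n3]
  rfl

theorem hasMagic_iff (name : String) :
    PySem.Str.isIn "California State University,niversity of California," name = true
      ↔ pvMagic <:+: name.toList := by
  rw [PySem.Str.isIn_iff_infix]
  rfl

theorem key : ∀ n l, l.length ≤ n → ¬ pvMagic <:+: l →
    rep pvP3 pvR3 (rep pvP2 pvR2 (rep pvP1 pvR1 l)) = altgo l := by
  intro n
  induction n with
  | zero =>
      intro l hl _
      have : l = [] := by cases l <;> simp_all
      subst this
      rw [rep_nil, rep_nil, rep_nil, altgo_nil]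
  | succ n ih =>
      intro l hl hm
      by_cases h1 : pvP1 <+: l
      · obtain ⟨t, rfl⟩ := h1
        have hlen : t.length ≤ n := by
          have e : pvP1.length = 34 := rfl
          rw [List.length_append, e] at hl; omega
        have hmt : ¬ pvMagic <:+: t :=
          fun hx => hm (hx.trans (List.suffix_append pvP1 t).isInfix)
        rw [rep_prefix pvP1 pvR1 _ (by decide) (List.prefix_append _ _), List.drop_left,
          passThrough pvP2 pvR2 pvR1 (by unfold Incompat; decide), passThrough pvP3 pvR3 pvR1 (by unfold Incompat; decide),
          ih t hlen hmt, altgo_p1 _ (List.prefix_append _ _),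
          show List.drop 34 (pvP1 ++ t) = t from by
            rw [show (34 : Nat) = pvP1.length from rfl]; exact List.drop_left]
      · by_cases h2 : pvP2 <+: l
        · obtain ⟨t, rfl⟩ := h2
          have hlen : t.length ≤ n := by
            have e : pvP2.length = 28 := rfl
            rw [List.length_append, e] at hl; omega
          have hmt : ¬ pvMagic <:+: t :=
            fun hx => hm (hx.trans (List.suffix_append pvP2 t).isInfix)
          have hq3 : ¬ pvQ3 <+: rep pvP2 pvR2 (rep pvP1 pvR1 t) := by
            intro hx
            have h5 := noCreate pvP2 pvR2 pvQ3 (by unfold Incompat; decide) _ pvQ3 List.suffix_rfl hx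
            have h6 := noCreate pvP1 pvR1 pvQ3 (by unfold Incompat; decide) t pvQ3 List.suffix_rfl h5
            refine hm (List.IsPrefix.isInfix ?_)
            rw [show pvMagic = pvP2 ++ pvQ3 from rfl]
            exact (List.prefix_append_right_inj pvP2).mpr h6
          rw [passThrough pvP1 pvR1 pvP2 (by unfold Incompat; decide),
            rep_prefix pvP2 pvR2 _ (by decide) (List.prefix_append _ _), List.drop_left,
            rep3_CSU _ hq3, ih t hlen hmt, altgo_p2 _ h1 (List.prefix_append _ _),
            show List.drop 28 (pvP2 ++ t) = t from by
              rw [show (28 : Nat) = pvP2.length from rfl]; exact List.drop_left]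
        · by_cases h3 : pvP3 <+: l
          · obtain ⟨t, rfl⟩ := h3
            have hlen : t.length ≤ n := by
              have e : pvP3.length = 25 := rfl
              rw [List.length_append, e] at hl; omega
            have hmt : ¬ pvMagic <:+: t :=
              fun hx => hm (hx.trans (List.suffix_append pvP3 t).isInfix)
            rw [passThrough pvP1 pvR1 pvP3 (by unfold Incompat; decide), passThrough pvP2 pvR2 pvP3 (by unfold Incompat; decide),
              rep_prefix pvP3 pvR3 _ (by decide) (List.prefix_append _ _), List.drop_left,
              ih t hlen hmt, altgo_p3 _ h1 h2 (List.prefix_append _ _),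
              show List.drop 25 (pvP3 ++ t) = t from by
                rw [show (25 : Nat) = pvP3.length from rfl]; exact List.drop_left]
          · cases l with
            | nil => rw [rep_nil, rep_nil, rep_nil, altgo_nil]
            | cons c t =>
                have hlen : t.length ≤ n := by simp at hl; omega
                have hmt : ¬ pvMagic <:+: t :=
                  fun hx => hm (hx.trans (List.suffix_cons c t).isInfix)
                have h2' : ¬ pvP2 <+: c :: rep pvP1 pvR1 t := by
                  intro hx
                  rw [show pvP2 = 'C' :: pvQ2 from rfl] at hx
                  obtain ⟨hc, hq⟩ := List.cons_prefix_cons.mp hx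
                  have h6 := noCreate pvP1 pvR1 pvQ2 (by unfold Incompat; decide) t pvQ2 List.suffix_rfl hq
                  refine h2 ?_
                  rw [show pvP2 = 'C' :: pvQ2 from rfl, hc]
                  exact List.cons_prefix_cons.mpr ⟨rfl, h6⟩
                have h3' : ¬ pvP3 <+: c :: rep pvP2 pvR2 (rep pvP1 pvR1 t) := by
                  intro hx
                  rw [show pvP3 = 'U' :: pvQ3 from rfl] at hx
                  obtain ⟨hc, hq⟩ := List.cons_prefix_cons.mp hx
                  have h5 := noCreate pvP2 pvR2 pvQ3 (by unfold Incompat; decide) _ pvQ3 List.suffix_rfl hq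
                  have h6 := noCreate pvP1 pvR1 pvQ3 (by unfold Incompat; decide) t pvQ3 List.suffix_rfl h5
                  refine h3 ?_
                  rw [show pvP3 = 'U' :: pvQ3 from rfl, hc]
                  exact List.cons_prefix_cons.mpr ⟨rfl, h6⟩
                rw [rep_nprefix _ _ _ _ h1, rep_nprefix _ _ _ _ h2', rep_nprefix _ _ _ _ h3',
                  ih t hlen hmt, altgo_char c t h1 h2 h3]

-- an occurrence of q in a ++ x must lie in x when no nonempty suffix of a is prefix-compatible with q
theorem infix_right (q a x : List Char) (h : q <:+: a ++ x) (hinc : Incompat a q) : q <:+: x := by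
  induction a with
  | nil => simpa using h
  | cons c a' ih =>
      rcases List.infix_cons_iff.mp h with h0 | h1
      · have hself := hinc (c :: a') ((List.mem_tails _ _).mpr List.suffix_rfl) (by simp)
        rcases List.prefix_or_prefix_of_prefix h0 (List.prefix_append (c :: a') x) with hx | hx
        · exact absurd hx hself.2
        · exact absurd hx hself.1
      · refine ih h1 ?_
        intro u hu hne
        exact hinc u ((List.mem_tails _ _).mpr (((List.mem_tails _ _).mp hu).trans (List.suffix_cons c a'))) hne

-- the same, with the condition only on PROPER suffixes, given q is not a prefix of a ++ x
theorem infix_right' (q a x : List Char) (h : q <:+: a ++ x) (h0 : ¬ q <+: a ++ x)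
    (hinc : ∀ u ∈ a.tails, u ≠ [] → u.length < a.length → ¬ u <+: q ∧ ¬ q <+: u) : q <:+: x := by
  induction a with
  | nil => simpa using h
  | cons c a' ih =>
      rcases List.infix_cons_iff.mp h with hx | h1
      · exact absurd hx h0
      · cases a' with
        | nil => exact h1
        | cons d a'' =>
            have hu := hinc (d :: a'') ((List.mem_tails _ _).mpr (List.suffix_cons c (d :: a''))) (by simp) (by simp)
            refine ih h1 ?_ ?_
            · intro hq
              rcases List.prefix_or_prefix_of_prefix hq (List.prefix_append (d :: a'') x) with hy | hy
              · exact hu.2 hy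
              · exact hu.1 hy
            · intro u huu hne hlt
              exact hinc u ((List.mem_tails _ _).mpr (((List.mem_tails _ _).mp huu).trans (List.suffix_cons c (d :: a'')))) hne
                (by simp at hlt ⊢; omega)

-- a prefix q of t survives rep when no match of p can begin inside q
theorem pres (p new q : List Char) (hq : Incompat q p) : ∀ t, q <+: t → q <+: rep p new t := by
  induction q with
  | nil => intro t _; exact List.nil_prefix
  | cons c q' ih =>
      intro t hpre
      cases t with
      | nil => exact absurd (List.eq_nil_of_prefix_nil hpre) (by simp)
      | cons d t' =>
          obtain ⟨hc, hq'⟩ := List.cons_prefix_cons.mp hpre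
          subst hc
          have hnp : ¬ p <+: (c :: t') := by
            intro hx
            have hself := hq (c :: q') ((List.mem_tails _ _).mpr List.suffix_rfl) (by simp)
            rcases List.prefix_or_prefix_of_prefix hx hpre with hy | hy
            · exact hself.2 hy
            · exact hself.1 hy
          rw [rep_nprefix p new c t' hnp]
          refine List.cons_prefix_cons.mpr ⟨rfl, ih ?_ t' hq'⟩
          intro u hu hne
          exact hq u ((List.mem_tails _ _).mpr (((List.mem_tails _ _).mp hu).trans (List.suffix_cons c q'))) hne

theorem keyNe : ∀ n l, l.length ≤ n → pvMagic <:+: l →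
    rep pvP3 pvR3 (rep pvP2 pvR2 (rep pvP1 pvR1 l)) ≠ altgo l := by
  intro n
  induction n with
  | zero =>
      intro l hl hm
      have : l = [] := by cases l <;> simp_all
      subst this
      exact absurd ((List.infix_nil).mp hm) (by decide)
  | succ n ih =>
      intro l hl hm
      by_cases h1 : pvP1 <+: l
      · obtain ⟨t, rfl⟩ := h1
        have hlen : t.length ≤ n := by
          have e : pvP1.length = 34 := rfl
          rw [List.length_append, e] at hl; omega
        have hmt : pvMagic <:+: t := infix_right _ _ _ hm (by unfold Incompat; decide)
        rw [rep_prefix pvP1 pvR1 _ (by decide) (List.prefix_append _ _), List.drop_left,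
          passThrough pvP2 pvR2 pvR1 (by unfold Incompat; decide),
          passThrough pvP3 pvR3 pvR1 (by unfold Incompat; decide),
          altgo_p1 _ (List.prefix_append _ _),
          show List.drop 34 (pvP1 ++ t) = t from by
            rw [show (34 : Nat) = pvP1.length from rfl]; exact List.drop_left]
        intro heq
        exact ih t hlen hmt (List.append_cancel_left heq)
      · by_cases h2 : pvP2 <+: l
        · obtain ⟨t, rfl⟩ := h2
          have hlen : t.length ≤ n := by
            have e : pvP2.length = 28 := rfl
            rw [List.length_append, e] at hl; omega
          rw [passThrough pvP1 pvR1 pvP2 (by unfold Incompat; decide),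
            rep_prefix pvP2 pvR2 _ (by decide) (List.prefix_append _ _), List.drop_left,
            altgo_p2 _ h1 (List.prefix_append _ _),
            show List.drop 28 (pvP2 ++ t) = t from by
              rw [show (28 : Nat) = pvP2.length from rfl]; exact List.drop_left]
          by_cases hq3 : pvQ3 <+: t
          · -- the cascade itself: A produces "CS" ++ "UC" ++ …, B produces "CSU" ++ 'n' ++ …
            have hZ : pvQ3 <+: rep pvP2 pvR2 (rep pvP1 pvR1 t) :=
              pres pvP2 pvR2 pvQ3 (by unfold Incompat; decide) _
                (pres pvP1 pvR1 pvQ3 (by unfold Incompat; decide) t hq3)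
            set Z := rep pvP2 pvR2 (rep pvP1 pvR1 t)
            have n1 : ¬ pvP3 <+: ('C' :: 'S' :: 'U' :: Z) := by
              intro hx
              rw [show pvP3 = 'U' :: pvQ3 from rfl] at hx
              exact absurd (List.cons_prefix_cons.mp hx).1 (by decide)
            have n2 : ¬ pvP3 <+: ('S' :: 'U' :: Z) := by
              intro hx
              rw [show pvP3 = 'U' :: pvQ3 from rfl] at hx
              exact absurd (List.cons_prefix_cons.mp hx).1 (by decide)
            have hpU : pvP3 <+: ('U' :: Z) := by
              rw [show pvP3 = 'U' :: pvQ3 from rfl]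
              exact List.cons_prefix_cons.mpr ⟨rfl, hZ⟩
            have eA : rep pvP3 pvR3 (pvR2 ++ Z)
                = 'C' :: 'S' :: 'U' :: 'C' :: rep pvP3 pvR3 (List.drop pvP3.length ('U' :: Z)) := by
              rw [show pvR2 ++ Z = 'C' :: 'S' :: 'U' :: Z from rfl,
                rep_nprefix _ _ _ _ n1, rep_nprefix _ _ _ _ n2,
                rep_prefix pvP3 pvR3 _ (by decide) hpU]
              rfl
            obtain ⟨d, t', rfl⟩ : ∃ d t', t = d :: t' := by
              cases t with
              | nil => exact absurd (List.eq_nil_of_prefix_nil hq3) (by decide)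
              | cons d t' => exact ⟨d, t', rfl⟩
            have hd : d = 'n' := by
              have := (List.cons_prefix_cons.mp (show 'n' :: "iversity of California,".toList <+: d :: t' from hq3)).1
              exact this.symm
            subst hd
            have eB : altgo ('n' :: t') = 'n' :: altgo t' := by
              refine altgo_char 'n' t' ?_ ?_ ?_
              · intro hx
                rw [show pvP1 = 'C' :: pvP1.tail from rfl] at hx
                exact absurd (List.cons_prefix_cons.mp hx).1 (by decide)
              · intro hx
                rw [show pvP2 = 'C' :: pvQ2 from rfl] at hx
                exact absurd (List.cons_prefix_cons.mp hx).1 (by decide)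
              · intro hx
                rw [show pvP3 = 'U' :: pvQ3 from rfl] at hx
                exact absurd (List.cons_prefix_cons.mp hx).1 (by decide)
            rw [eA, eB, show pvR2 ++ ('n' :: altgo t') = 'C' :: 'S' :: 'U' :: 'n' :: altgo t' from rfl]
            intro heq
            simp at heq
          · have hmt : pvMagic <:+: t := by
              refine infix_right' pvMagic pvP2 t ?_ ?_ ?_
              · exact hm
              · intro hx
                exact hq3 ((List.prefix_append_right_inj pvP2).mp
                  (show pvP2 ++ pvQ3 <+: pvP2 ++ t from hx))
              · decide
            have hq3Z : ¬ pvQ3 <+: rep pvP2 pvR2 (rep pvP1 pvR1 t) := by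
              intro hx
              have h5 := noCreate pvP2 pvR2 pvQ3 (by unfold Incompat; decide) _ pvQ3 List.suffix_rfl hx
              exact hq3 (noCreate pvP1 pvR1 pvQ3 (by unfold Incompat; decide) t pvQ3 List.suffix_rfl h5)
            rw [rep3_CSU _ hq3Z]
            intro heq
            exact ih t hlen hmt (List.append_cancel_left heq)
        · by_cases h3 : pvP3 <+: l
          · obtain ⟨t, rfl⟩ := h3
            have hlen : t.length ≤ n := by
              have e : pvP3.length = 25 := rfl
              rw [List.length_append, e] at hl; omega
            have hmt : pvMagic <:+: t := infix_right _ _ _ hm (by unfold Incompat; decide)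
            rw [passThrough pvP1 pvR1 pvP3 (by unfold Incompat; decide),
              passThrough pvP2 pvR2 pvP3 (by unfold Incompat; decide),
              rep_prefix pvP3 pvR3 _ (by decide) (List.prefix_append _ _), List.drop_left,
              altgo_p3 _ h1 h2 (List.prefix_append _ _),
              show List.drop 25 (pvP3 ++ t) = t from by
                rw [show (25 : Nat) = pvP3.length from rfl]; exact List.drop_left]
            intro heq
            exact ih t hlen hmt (List.append_cancel_left heq)
          · cases l with
            | nil =>
                intro _
                exact absurd ((List.infix_nil).mp hm) (by decide)
            | cons c t =>
                have hlen : t.length ≤ n := by simp at hl; omega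
                have hmt : pvMagic <:+: t := by
                  rcases List.infix_cons_iff.mp hm with hx | hx
                  · exact absurd ((show pvP2 <+: pvMagic from ⟨pvQ3, rfl⟩).trans hx) h2
                  · exact hx
                have h2' : ¬ pvP2 <+: c :: rep pvP1 pvR1 t := by
                  intro hx
                  rw [show pvP2 = 'C' :: pvQ2 from rfl] at hx
                  obtain ⟨hc, hq⟩ := List.cons_prefix_cons.mp hx
                  have h6 := noCreate pvP1 pvR1 pvQ2 (by unfold Incompat; decide) t pvQ2 List.suffix_rfl hq
                  refine h2 ?_
                  rw [show pvP2 = 'C' :: pvQ2 from rfl, hc]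
                  exact List.cons_prefix_cons.mpr ⟨rfl, h6⟩
                have h3' : ¬ pvP3 <+: c :: rep pvP2 pvR2 (rep pvP1 pvR1 t) := by
                  intro hx
                  rw [show pvP3 = 'U' :: pvQ3 from rfl] at hx
                  obtain ⟨hc, hq⟩ := List.cons_prefix_cons.mp hx
                  have h5 := noCreate pvP2 pvR2 pvQ3 (by unfold Incompat; decide) _ pvQ3 List.suffix_rfl hq
                  have h6 := noCreate pvP1 pvR1 pvQ3 (by unfold Incompat; decide) t pvQ3 List.suffix_rfl h5
                  refine h3 ?_
                  rw [show pvP3 = 'U' :: pvQ3 from rfl, hc]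
                  exact List.cons_prefix_cons.mpr ⟨rfl, h6⟩
                rw [rep_nprefix _ _ _ _ h1, rep_nprefix _ _ _ _ h2', rep_nprefix _ _ _ _ h3',
                  altgo_char c t h1 h2 h3]
                intro heq
                exact ih t hlen hmt (by simpa using heq)

-- ===== VERDICT (by name: the statement is the Claim_ definition above) =====
theorem simplify_school_names_spec : Claim_unchanged_simplify_school_names := by
  intro name _hdom
  unfold Spec_simplify_school_names
  intro hD
  have hmagic : ¬ pvMagic <:+: name.toList := fun hx => hD ((hasMagic_iff name).mpr hx)
  show simplify_school_names name = simplify_school_names_alt name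
  simp only [simplify_school_names, simplify_school_names_alt, List.foldl, PySem.Str.replace]
  simp only [String.toList_ofList]
  rw [replace_eq_rep _ _ _ (by decide), replace_eq_rep _ _ _ (by decide),
    replace_eq_rep _ _ _ (by decide)]
  exact congrArg String.ofList (key name.toList.length name.toList le_rfl hmagic)

theorem witness_alt :
    simplify_school_names_alt pvDiffWitness_simplify_school_names
      = "CSUniversity of California," := by
  unfold simplify_school_names_alt
  have h0 : altgo (pvDiffWitness_simplify_school_names.toList)
      = pvR2 ++ altgo pvQ3 := by
    rw [altgo_p2 _ (by decide) (by decide),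
      show List.drop 28 pvDiffWitness_simplify_school_names.toList = pvQ3 from by decide]
  have h1 : altgo pvQ3 = pvQ3 := by
    have h2 := key pvQ3.length pvQ3 le_rfl (by decide)
    rw [← h2, ← replace_eq_rep _ _ _ (by decide), ← replace_eq_rep _ _ _ (by decide),
      ← replace_eq_rep _ _ _ (by decide)]
    decide
  rw [h0, h1]
  decide

theorem simplify_school_names_changed : Claim_changed_simplify_school_names := by
  unfold Claim_changed_simplify_school_names
  refine ⟨by decide, by decide, by decide, witness_alt, by decide⟩

theorem simplify_school_names_tight : Claim_exact_simplify_school_names := by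
  intro name _hdom hD heq
  have hmagic : pvMagic <:+: name.toList := (hasMagic_iff name).mp hD
  have heqL : rep pvP3 pvR3 (rep pvP2 pvR2 (rep pvP1 pvR1 name.toList)) = altgo name.toList := by
    have h := congrArg String.toList heq
    simp only [simplify_school_names, simplify_school_names_alt, List.foldl,
      PySem.Str.replace, String.toList_ofList] at h
    rwa [replace_eq_rep _ _ _ (by decide), replace_eq_rep _ _ _ (by decide),
      replace_eq_rep _ _ _ (by decide)] at h
  exact keyNe name.toList.length name.toList le_rfl hmagic heqL
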